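/- GENERATED by farm/worked/mk_tree_copies.py from farm/worked/uint32_compare/Proof.lean (a worked proof of the farm's unit `uint32_compare`,
   accepted by the verdict) — do not edit. -/
import Vorbis.Spec.Units.uint32_compare

open X86 X86.User Asan Vorbis

set_option maxRecDepth 4000
set_option maxHeartbeats 4000000

theorem Vorbis.Spec.Worked.uint32_compare_ok : Vorbis.Spec.uint32_compare.Statement := by
  intro Lay hLay μ hμ u₀ hcode hload4 others frames u ret he hpre
  v_entry he
  obtain ⟨hsh, hlp, hlq⟩ := hpre
  have hsp := hsh.rsp
  have hwp := hlp.where_ hsh.inv hsh.offText (by decide)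
  have hwq := hlq.where_ hsh.inv hsh.offText (by decide)
  u_walk hcode [hμ.vendor] span [Vorbis.L.textLo, Vorbis.L.textHi] side (v_side)
  · have hun : ShadowUntouched u.mem s_10474c.mem := by v_untouched
    exact hlp.accSmall hsh.inv hun _ 4 (by decide) (by u_omega) (by u_omega)
  · have hun : ShadowUntouched u.mem s_104757.mem := by v_untouched
    exact hlq.accSmall hsh.inv hun _ 4 (by decide) (by u_omega) (by u_omega)
  · refine ReachVia.done ?_
    v_returned
    refine ⟨by v_untouched, ?_⟩
    rw [w_rax]
    have hx : u.mem.readLE (u.reg .rdi) 4 < 2 ^ 32 := Mem.readLE_lt _ _ _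
    have hy : u.mem.readLE (u.reg .rsi) 4 < 2 ^ 32 := Mem.readLE_lt _ _ _
    unfold Vorbis.Spec.cmpResult
    rw [if_pos (by omega)]
    rfl
  · refine ReachVia.done ?_
    v_returned
    refine ⟨by v_untouched, ?_⟩
    rw [w_rax]
    simp only [cond_simp, X86.Cond.lt_eq_decide_toNat, decide_eq_true_eq, BitVec.toNat_ofNat, Nat.reducePow]
    have hx : u.mem.readLE (u.reg .rdi) 4 < 2 ^ 32 := Mem.readLE_lt _ _ _
    have hy : u.mem.readLE (u.reg .rsi) 4 < 2 ^ 32 := Mem.readLE_lt _ _ _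
    unfold Vorbis.Spec.cmpResult
    have hnlt : ¬ u.mem.readLE (u.reg .rdi) 4 < u.mem.readLE (u.reg .rsi) 4 := by omega
    by_cases h : u.mem.readLE (u.reg .rsi) 4 < u.mem.readLE (u.reg .rdi) 4
    · have h' : u.mem.readLE (u.reg .rsi) 4 % 4294967296 < u.mem.readLE (u.reg .rdi) 4 % 4294967296 := by omega
      rw [if_pos h', if_neg hnlt, if_pos h]
      rfl
    · have h' : ¬ u.mem.readLE (u.reg .rsi) 4 % 4294967296 < u.mem.readLE (u.reg .rdi) 4 % 4294967296 := by omega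
      rw [if_neg h', if_neg hnlt, if_neg h]
      rfl
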